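-- pv_equiv track=rewrite | github.com/saiteja5421/ojt_problems | ojt_paper_5/main.py | tarnform_string
-- ===== SOURCE A (Python) =====
-- def tarnform_string(l):
--     string=""
--     index=0
--     count=0
--     while index<len(l):
--         if not l[index].isdigit():
--             temp=index
--             while temp < len(l):
--                 if l[temp]==l[index]:
--
--                     count+=1
--                     temp+=1
--                 else:
--                     break
--             string+=l[index]+str(count)
--             count=0
--             index=temp
--         else:
--             string+=l[index]
--             index+=1
--     return string
-- ===== SOURCE B (Python) =====
-- def tarnform_string(l):
--     parts = []
--     prev = None
--     n = 0
--     for ch in l: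
--         if prev is not None and ch == prev:
--             n += 1
--         else:
--             if prev is not None:
--                 parts.append(prev * n if prev.isdigit() else prev + str(n))
--             prev = ch
--             n = 1
--     if prev is not None:
--         parts.append(prev * n if prev.isdigit() else prev + str(n))
--     return "".join(parts)
-- ===== Notes on version B (the rewrite author's own statement) =====
-- stated objective: faster
-- what changed: Replaced A's nested while loops with index/temp bookkeeping and repeated string concatenation by a single forward pass that keeps a (previous char, run length) state, flushes each completed run as one piece (ch*n for digit runs, ch+str(n) otherwise) into a list, and joins once at the end.
import Mathlib
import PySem

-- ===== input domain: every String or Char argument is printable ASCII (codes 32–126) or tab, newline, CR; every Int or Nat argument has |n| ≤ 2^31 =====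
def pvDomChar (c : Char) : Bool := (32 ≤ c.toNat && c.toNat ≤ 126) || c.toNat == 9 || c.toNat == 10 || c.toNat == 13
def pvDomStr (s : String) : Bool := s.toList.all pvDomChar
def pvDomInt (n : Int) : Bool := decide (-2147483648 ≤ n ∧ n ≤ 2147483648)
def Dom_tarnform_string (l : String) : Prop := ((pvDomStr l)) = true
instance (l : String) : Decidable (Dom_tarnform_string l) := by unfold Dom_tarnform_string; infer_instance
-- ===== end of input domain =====

-- B replaces A's nested index-jumping whiles by one pass with (prev, count) run state and a final join; equivalence of the return values is proved (no mutation involved).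

-- ===== PORT A =====
-- inner while: starting at temp, count while l[temp] == l[index] (c is l[index])
def pvRunLenA (c : Char) : List Char → Nat
  | [] => 0
  | x :: xs => if x == c then 1 + pvRunLenA c xs else 0

theorem pvRunLenA_cons_self (c : Char) (rest : List Char) :
    pvRunLenA c (c :: rest) = pvRunLenA c rest + 1 := by
  simp [pvRunLenA, Nat.add_comm]

-- outer while over the remaining suffix, with the string accumulator
def pvLoopA : List Char → List Char → List Char
  | [], acc => acc
  | c :: rest, acc =>
    if ¬ PySem.Chars.isdigit c then
      let cnt := pvRunLenA c (c :: rest)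
      pvLoopA ((c :: rest).drop cnt) (acc ++ [c] ++ (PySem.Int.toStr (cnt : Int)).toList)
    else
      pvLoopA rest (acc ++ [c])
termination_by cs _ => cs.length
decreasing_by
  · rw [pvRunLenA_cons_self]
    simp only [List.drop_succ_cons, List.length_cons, List.length_drop]
    omega
  · simp

def tarnform_string (l : String) : String := String.mk (pvLoopA l.toList [])

-- ===== PORT B =====
-- one emitted piece for a finished run
def pvPieceB (c : Char) (n : Nat) : List Char :=
  if PySem.Chars.isdigit c then List.replicate n c
  else [c] ++ (PySem.Int.toStr (n : Int)).toList

-- loop body of B: state = (parts, prev, n)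
def pvStepB (st : List (List Char) × Option Char × Nat) (ch : Char) :
    List (List Char) × Option Char × Nat :=
  match st with
  | (parts, some p, n) =>
    if ch == p then (parts, some p, n + 1)
    else (parts ++ [pvPieceB p n], some ch, 1)
  | (parts, none, _) => (parts, some ch, 1)

-- final flush + "".join
def pvFinishB (st : List (List Char) × Option Char × Nat) : List Char :=
  match st with
  | (parts, some p, n) => PySem.Chars.join [] (parts ++ [pvPieceB p n])
  | (parts, none, _) => PySem.Chars.join [] parts

def tarnform_string_alt (l : String) : String :=
  String.mk (pvFinishB (l.toList.foldl pvStepB ([], none, 0)))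

-- ===== PRECONDITION & SPEC =====
def Spec_tarnform_string (l : String) (out : String) : Prop := out = tarnform_string_alt l
instance (l : String) (out : String) : Decidable (Spec_tarnform_string l out) := by unfold Spec_tarnform_string; infer_instance

-- ===== CLAIM (what is proved, stated in full; the proofs are below) =====
def Claim_equal_tarnform_string : Prop := ∀ (l : String), Dom_tarnform_string l → Spec_tarnform_string l (tarnform_string l)

-- ===== LEMMAS AND PROOFS =====

-- canonical run-length form both ports are reduced to
def pvCanon : List Char → List Char
  | [] => []
  | c :: rest =>
    pvPieceB c (pvRunLenA c rest + 1) ++ pvCanon (rest.drop (pvRunLenA c rest))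
termination_by cs => cs.length
decreasing_by
  simp only [List.length_cons, List.length_drop]
  omega

theorem pvCanon_cons (c : Char) (rest : List Char) :
    pvCanon (c :: rest) =
      pvPieceB c (pvRunLenA c rest + 1) ++ pvCanon (rest.drop (pvRunLenA c rest)) := by
  rw [pvCanon]

theorem pvCanon_digit_cons (c : Char) (rest : List Char)
    (hd : PySem.Chars.isdigit c = true) :
    pvCanon (c :: rest) = c :: pvCanon rest := by
  rw [pvCanon]
  cases rest with
  | nil => simp [pvRunLenA, pvPieceB, hd, pvCanon]
  | cons d rest2 =>
    by_cases hdc : d == c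
    · have hde : d = c := eq_of_beq hdc
      subst hde
      rw [pvRunLenA_cons_self, pvCanon]
      simp [pvPieceB, hd, List.replicate_succ]
    · simp [pvRunLenA, hdc, pvPieceB, hd]

theorem pvLoopA_eq (cs acc : List Char) :
    pvLoopA cs acc = acc ++ pvCanon cs := by
  fun_induction pvLoopA cs acc with
  | case1 acc => simp [pvCanon]
  | case2 c rest acc hnd cnt ih =>
    rw [ih, pvCanon_cons]
    rw [show cnt = pvRunLenA c rest + 1 from pvRunLenA_cons_self c rest]
    simp only [Bool.not_eq_true] at hnd
    simp [pvPieceB, hnd, List.drop_succ_cons, List.append_assoc]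
  | case3 c rest acc hd ih =>
    rw [ih]
    simp only [Bool.not_eq_true, Bool.not_eq_false] at hd
    rw [pvCanon_digit_cons c rest hd]
    simp

theorem pvJoin_nil_flatten (zs : List (List Char)) :
    PySem.Chars.join [] zs = zs.flatten := by
  induction zs with
  | nil => exact PySem.Chars.join_nil []
  | cons x t ih =>
    cases t with
    | nil => simp [PySem.Chars.join_singleton]
    | cons y u =>
      rw [PySem.Chars.join_cons_cons]
      rw [ih]
      simp

theorem pvStepB_run (cs : List Char) :
    ∀ (parts : List (List Char)) (p : Char) (n : Nat),
      pvFinishB (cs.foldl pvStepB (parts, some p, n)) =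
        parts.flatten ++ pvPieceB p (n + pvRunLenA p cs) ++
          pvCanon (cs.drop (pvRunLenA p cs)) := by
  induction cs with
  | nil =>
    intro parts p n
    simp [pvRunLenA, pvCanon, pvFinishB, pvJoin_nil_flatten]
  | cons d rest ih =>
    intro parts p n
    by_cases hdp : d == p
    · have : d = p := eq_of_beq hdp
      subst this
      rw [pvRunLenA_cons_self]
      simp only [List.foldl_cons, pvStepB, beq_self_eq_true, if_true]
      rw [ih parts d (n + 1)]
      simp only [List.drop_succ_cons]
      ring_nf
    · simp only [List.foldl_cons, pvStepB, hdp, Bool.false_eq_true, if_false]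
      rw [ih (parts ++ [pvPieceB p n]) d 1]
      simp only [pvRunLenA, hdp, Bool.false_eq_true, if_false, List.drop_zero,
        Nat.add_zero]
      rw [pvCanon_cons]
      simp [List.append_assoc, Nat.add_comm]

theorem pvB_eq_canon (cs : List Char) :
    pvFinishB (cs.foldl pvStepB ([], none, 0)) = pvCanon cs := by
  cases cs with
  | nil => simp [pvFinishB, PySem.Chars.join_nil, pvCanon]
  | cons c rest =>
    simp only [List.foldl_cons, pvStepB]
    rw [pvStepB_run rest [] c 1]
    rw [pvCanon_cons]
    simp [Nat.add_comm]

-- ===== VERDICT (by name: the statement is the Claim_ definition above) =====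
theorem tarnform_string_spec : Claim_equal_tarnform_string := by
  intro l _
  unfold Spec_tarnform_string tarnform_string tarnform_string_alt
  rw [pvLoopA_eq, pvB_eq_canon]
  simp
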